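-- pv_equiv track=rewrite | github.com/AnukaMithara/Competitive-Programming | Mora Xtreme 8.0/Python/sanji.py | max_healthy_cells
-- ===== SOURCE A (Python) =====
-- def max_healthy_cells(n, p, pos, m, y, r):
--     # Initialize the total number of cells and the fungus layers
--     total_cells = sum(p)
--     layers = list(zip(y, r))
--
--     # Calculate the number of cells affected by each layer
--     affected_cells = []
--     for layer in layers:
--         layer_pos, layer_range = layer
--         affected = 0
--         for i in range(n):
--             if abs(layer_pos - pos[i]) <= layer_range:
--                 affected += p[i]
--         affected_cells.append(affected)
--
--     # Find the maximum number of healthy cells by removing one layer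
--     max_healthy = total_cells - min(affected_cells)
--
--     return max_healthy
-- ===== SOURCE B (Python) =====
-- def _bisect_left(xs, v):
--     lo, hi = 0, len(xs)
--     while lo < hi:
--         mid = (lo + hi) // 2
--         if xs[mid] < v:
--             lo = mid + 1
--         else:
--             hi = mid
--     return lo
--
--
-- def _bisect_right(xs, v):
--     lo, hi = 0, len(xs)
--     while lo < hi:
--         mid = (lo + hi) // 2
--         if v < xs[mid]:
--             hi = mid
--         else:
--             lo = mid + 1
--     return lo
--
--
-- def max_healthy_cells(n, p, pos, m, y, r):
--     total = sum(p)
--     pts = sorted(((pos[i], p[i]) for i in range(n)), key=lambda t: t[0])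
--     xs = [t[0] for t in pts]
--     pref = [0]
--     s = 0
--     for _, w in pts:
--         s += w
--         pref.append(s)
--     affected = []
--     for ly, lr in zip(y, r):
--         lo = _bisect_left(xs, ly - lr)
--         hi = _bisect_right(xs, ly + lr)
--         affected.append(pref[hi] - pref[lo] if lo < hi else 0)
--     return total - min(affected)
-- ===== Notes on version B (the rewrite author's own statement) =====
-- stated objective: faster
-- what changed: Instead of rescanning all n positions for every layer (nested loops), B sorts the (position, count) pairs once, builds a prefix-sum array, and answers each layer's interval [y-r, y+r] with two hand-written binary searches.
-- outside the precondition, e.g. on max_healthy_cells(1, [], [5], 1, [100], [1]): A returns 0, B raises IndexError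
import Mathlib
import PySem

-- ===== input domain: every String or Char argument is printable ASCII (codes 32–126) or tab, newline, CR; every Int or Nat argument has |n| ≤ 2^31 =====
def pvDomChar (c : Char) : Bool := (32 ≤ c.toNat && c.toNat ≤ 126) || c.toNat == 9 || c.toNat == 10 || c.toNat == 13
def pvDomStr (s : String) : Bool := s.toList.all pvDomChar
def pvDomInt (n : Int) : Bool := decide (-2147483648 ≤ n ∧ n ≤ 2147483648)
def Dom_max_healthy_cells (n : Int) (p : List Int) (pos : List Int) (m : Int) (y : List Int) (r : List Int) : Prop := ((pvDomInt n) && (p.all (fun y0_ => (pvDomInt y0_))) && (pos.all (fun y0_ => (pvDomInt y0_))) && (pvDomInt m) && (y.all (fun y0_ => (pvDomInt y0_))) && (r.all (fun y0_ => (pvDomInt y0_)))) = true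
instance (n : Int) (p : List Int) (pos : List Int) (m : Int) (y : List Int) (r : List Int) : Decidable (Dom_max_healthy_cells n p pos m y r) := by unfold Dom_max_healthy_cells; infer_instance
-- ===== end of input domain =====

-- B replaces A's per-layer rescan of all n positions by one sort + prefix sums + two
-- hand-written binary searches per layer (objective: faster).

-- ===== PORT A =====
def max_healthy_cells (n : Int) (p : List Int) (pos : List Int) (m : Int) (y : List Int) (r : List Int) : Int :=
  let total_cells := p.sum
  let layers := y.zip r
  let affected_cells := layers.foldl (fun acc layer =>
    acc ++ [(PySem.List.pyRange 0 n 1).foldl (fun affected i =>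
      if |layer.1 - PySem.List.pyGetD pos i 0| ≤ layer.2 then affected + PySem.List.pyGetD p i 0
      else affected) 0]) []
  total_cells - (PySem.List.min? affected_cells (fun x => x)).getD 0

-- ===== PORT B =====
-- B's hand-written _bisect_left: while lo < hi: mid = (lo+hi)//2; … (lo, hi stay ≥ 0: Nat)
def pvBisectLeft (xs : List Int) (v : Int) (lo hi : Nat) : Nat :=
  if _h : lo < hi then
    let mid := (lo + hi) / 2
    if xs.getD mid 0 < v then pvBisectLeft xs v (mid + 1) hi
    else pvBisectLeft xs v lo mid
  else lo
termination_by hi - lo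
decreasing_by all_goals omega

-- B's hand-written _bisect_right
def pvBisectRight (xs : List Int) (v : Int) (lo hi : Nat) : Nat :=
  if _h : lo < hi then
    let mid := (lo + hi) / 2
    if v < xs.getD mid 0 then pvBisectRight xs v lo mid
    else pvBisectRight xs v (mid + 1) hi
  else lo
termination_by hi - lo
decreasing_by all_goals omega

def max_healthy_cells_alt (n : Int) (p : List Int) (pos : List Int) (m : Int) (y : List Int) (r : List Int) : Int :=
  let total := p.sum
  let pts := PySem.List.sorted ((PySem.List.pyRange 0 n 1).map
      (fun i => (PySem.List.pyGetD pos i 0, PySem.List.pyGetD p i 0))) (fun t => t.1)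
  let xs := pts.map (fun t => t.1)
  let pref := (pts.foldl (fun (a : List Int × Int) pw => (a.1 ++ [a.2 + pw.2], a.2 + pw.2)) ([0], 0)).1
  let affected := (y.zip r).map (fun lyr =>
    let lo := pvBisectLeft xs (lyr.1 - lyr.2) 0 xs.length
    let hi := pvBisectRight xs (lyr.1 + lyr.2) 0 xs.length
    if lo < hi then PySem.List.pyGetD pref (hi : Int) 0 - PySem.List.pyGetD pref (lo : Int) 0 else 0)
  total - (PySem.List.min? affected (fun x => x)).getD 0

-- ===== PRECONDITION & SPEC =====
-- Pre_ excludes exactly where Python A raises: min([]) (ValueError) when y or r is empty,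
-- and IndexError on pos[i]/p[i] when n exceeds a length.  (n ≤ len p also drops the rare
-- inputs where A's short-circuit never evaluates p[i] beyond len p and A still returns;
-- B indexes p[i] for every i < n and raises there.)
def Pre_max_healthy_cells (n : Int) (p : List Int) (pos : List Int) (m : Int) (y : List Int) (r : List Int) : Prop :=
  n ≤ (pos.length : Int) ∧ n ≤ (p.length : Int) ∧ y ≠ [] ∧ r ≠ []
instance (n : Int) (p : List Int) (pos : List Int) (m : Int) (y : List Int) (r : List Int) : Decidable (Pre_max_healthy_cells n p pos m y r) := by unfold Pre_max_healthy_cells; infer_instance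

def pvWitness_max_healthy_cells : Int × List Int × List Int × Int × List Int × List Int :=
  (3, [2, 5, 1], [0, 4, 9], 2, [3, 8], [2, 1])

def Spec_max_healthy_cells (n : Int) (p : List Int) (pos : List Int) (m : Int) (y : List Int) (r : List Int) (out : Int) : Prop := out = max_healthy_cells_alt n p pos m y r
instance (n : Int) (p : List Int) (pos : List Int) (m : Int) (y : List Int) (r : List Int) (out : Int) : Decidable (Spec_max_healthy_cells n p pos m y r out) := by unfold Spec_max_healthy_cells; infer_instance

-- ===== CLAIM (what is proved, stated in full; the proofs are below) =====
def Claim_equal_max_healthy_cells : Prop := ∀ (n : Int) (p : List Int) (pos : List Int) (m : Int) (y : List Int) (r : List Int), Dom_max_healthy_cells n p pos m y r → Pre_max_healthy_cells n p pos m y r → Spec_max_healthy_cells n p pos m y r (max_healthy_cells n p pos m y r)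

-- ===== LEMMAS AND PROOFS =====

-- _bisect_left invariant: below lo everything is < v, from hi on everything is ≥ v
theorem pvBisectLeft_spec (xs : List Int) (v : Int) (hs : xs.Pairwise (· ≤ ·)) :
    ∀ (lo hi : Nat), lo ≤ hi → hi ≤ xs.length →
    (∀ j (hj : j < xs.length), j < lo → xs[j] < v) →
    (∀ j (hj : j < xs.length), hi ≤ j → v ≤ xs[j]) →
    pvBisectLeft xs v lo hi ≤ xs.length ∧
      (∀ j (hj : j < xs.length), (xs[j] < v ↔ j < pvBisectLeft xs v lo hi)) := by
  have hmono : ∀ i j (hi : i < xs.length) (hj : j < xs.length), i ≤ j → xs[i] ≤ xs[j] := by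
    intro i j hi hj hij
    rcases Nat.lt_or_ge i j with h | h
    · exact (List.pairwise_iff_getElem.mp hs) i j hi hj h
    · have : i = j := by omega
      subst this; exact le_refl _
  intro lo hi
  induction lo, hi using pvBisectLeft.induct xs v with
  | case1 lo hi h mid hcmp ih =>
    intro hlh hhl hbelow habove
    have hmlt : mid < xs.length := by omega
    have hgetD : xs.getD mid 0 = xs[mid] := List.getD_eq_getElem xs 0 hmlt
    rw [pvBisectLeft, dif_pos h]
    dsimp only
    rw [if_pos (show xs.getD ((lo + hi) / 2) 0 < v from hcmp)]
    apply ih (by omega) hhl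
    · intro j hj hjlt
      have : xs[j] ≤ xs[mid] := hmono j mid hj hmlt (by omega)
      have : xs[mid] < v := by rw [← hgetD]; exact hcmp
      omega
    · exact habove
  | case2 lo hi h mid hcmp ih =>
    intro hlh hhl hbelow habove
    have hmlt : mid < xs.length := by omega
    have hgetD : xs.getD mid 0 = xs[mid] := List.getD_eq_getElem xs 0 hmlt
    rw [pvBisectLeft, dif_pos h]
    dsimp only
    rw [if_neg (show ¬ xs.getD ((lo + hi) / 2) 0 < v from hcmp)]
    apply ih (by omega) (by omega) hbelow
    · intro j hj hjge
      have h1 : xs[mid] ≤ xs[j] := hmono mid j hmlt hj hjge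
      have h2 : v ≤ xs[mid] := by rw [← hgetD]; omega
      omega
  | case3 lo hi h =>
    intro hlh hhl hbelow habove
    rw [pvBisectLeft, dif_neg h]
    refine ⟨by omega, ?_⟩
    intro j hj
    constructor
    · intro hlt
      by_contra hge
      have : v ≤ xs[j] := habove j hj (by omega)
      omega
    · intro hjlt
      exact hbelow j hj hjlt

theorem pvBisectRight_spec (xs : List Int) (v : Int) (hs : xs.Pairwise (· ≤ ·)) :
    ∀ (lo hi : Nat), lo ≤ hi → hi ≤ xs.length →
    (∀ j (hj : j < xs.length), j < lo → xs[j] ≤ v) →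
    (∀ j (hj : j < xs.length), hi ≤ j → v < xs[j]) →
    pvBisectRight xs v lo hi ≤ xs.length ∧
      (∀ j (hj : j < xs.length), (xs[j] ≤ v ↔ j < pvBisectRight xs v lo hi)) := by
  have hmono : ∀ i j (hi : i < xs.length) (hj : j < xs.length), i ≤ j → xs[i] ≤ xs[j] := by
    intro i j hi hj hij
    rcases Nat.lt_or_ge i j with h | h
    · exact (List.pairwise_iff_getElem.mp hs) i j hi hj h
    · have : i = j := by omega
      subst this; exact le_refl _
  intro lo hi
  induction lo, hi using pvBisectRight.induct xs v with
  | case1 lo hi h mid hcmp ih =>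
    intro hlh hhl hbelow habove
    have hmlt : mid < xs.length := by omega
    have hgetD : xs.getD mid 0 = xs[mid] := List.getD_eq_getElem xs 0 hmlt
    rw [pvBisectRight, dif_pos h]
    dsimp only
    rw [if_pos (show v < xs.getD ((lo + hi) / 2) 0 from hcmp)]
    apply ih (by omega) (by omega) hbelow
    intro j hj hjge
    have h1 : xs[mid] ≤ xs[j] := hmono mid j hmlt hj hjge
    have h2 : v < xs[mid] := by rw [← hgetD]; exact hcmp
    omega
  | case2 lo hi h mid hcmp ih =>
    intro hlh hhl hbelow habove
    have hmlt : mid < xs.length := by omega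
    have hgetD : xs.getD mid 0 = xs[mid] := List.getD_eq_getElem xs 0 hmlt
    rw [pvBisectRight, dif_pos h]
    dsimp only
    rw [if_neg (show ¬ v < xs.getD ((lo + hi) / 2) 0 from hcmp)]
    apply ih (by omega) hhl
    · intro j hj hjlt
      have : xs[j] ≤ xs[mid] := hmono j mid hj hmlt (by omega)
      have : xs[mid] ≤ v := by rw [← hgetD]; omega
      omega
    · exact habove
  | case3 lo hi h =>
    intro hlh hhl hbelow habove
    rw [pvBisectRight, dif_neg h]
    refine ⟨by omega, ?_⟩
    intro j hj
    constructor
    · intro hle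
      by_contra hge
      have : v < xs[j] := habove j hj (by omega)
      omega
    · intro hjlt
      exact hbelow j hj hjlt

-- the prefix-sum loop, fully characterised
theorem pref_fold (ps : List (Int × Int)) (acc : List Int) (s : Int) :
    (ps.foldl (fun (a : List Int × Int) pw => (a.1 ++ [a.2 + pw.2], a.2 + pw.2)) (acc, s)).1
      = acc ++ (List.range ps.length).map (fun k => s + ((ps.map (fun t => t.2)).take (k + 1)).sum) := by
  induction ps generalizing acc s with
  | nil => simp
  | cons pw t ih =>
    simp only [List.foldl_cons, List.map_cons, List.length_cons]
    rw [ih]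
    rw [List.append_assoc, List.range_succ_eq_map, List.map_cons]
    congr 1
    rw [List.singleton_append]
    congr 1
    · simp
    rw [List.map_map]
    apply List.map_congr_left
    intro k _
    simp only [Function.comp_apply, Nat.succ_eq_add_one]
    rw [List.take_succ_cons]
    simp [add_assoc]

-- element k of pref is the sum of the first k weights
theorem pref_getD (ps : List (Int × Int)) (k : Nat) (hk : k ≤ ps.length) :
    (PySem.List.pyGetD ((ps.foldl (fun (a : List Int × Int) pw => (a.1 ++ [a.2 + pw.2], a.2 + pw.2)) ([0], 0)).1) (k : Int) 0)
      = ((ps.map (fun t => t.2)).take k).sum := by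
  rw [PySem.List.pyGetD_natCast, pref_fold]
  cases k with
  | zero => simp
  | succ j =>
    have hj : j < ps.length := by omega
    rw [show ([0] : List Int) ++ _ = (0 : Int) :: (List.range ps.length).map (fun k => 0 + ((ps.map (fun t => t.2)).take (k + 1)).sum) from rfl]
    rw [List.getD_cons_succ]
    rw [List.getD_eq_getElem _ _ (by simpa using hj)]
    simp

-- a sum of weights whose condition holds exactly on the index block [lo, hi)
theorem sum_if_contig (ps : List (Int × Int)) (P : Int → Prop) [DecidablePred P] (lo hi : Nat)
    (hlo : lo ≤ hi) (hhi : hi ≤ ps.length)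
    (hiff : ∀ j (hj : j < ps.length), P (ps[j].1) ↔ (lo ≤ j ∧ j < hi)) :
    (ps.map (fun t => if P t.1 then t.2 else 0)).sum
      = ((ps.map (fun t => t.2)).take hi).sum - ((ps.map (fun t => t.2)).take lo).sum := by
  set h : Int × Int → Int := fun t => if P t.1 then t.2 else 0 with hh
  have hps : ps = ps.take hi ++ ps.drop hi := (List.take_append_drop hi ps).symm
  have htakehi : ps.take hi = ps.take lo ++ (ps.drop lo).take (hi - lo) := by
    rw [← List.take_add]
    congr 1; omega
  have hdrop0 : ((ps.drop hi).map h).sum = 0 := by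
    apply List.sum_eq_zero
    intro x hx
    rw [List.mem_map] at hx
    obtain ⟨t, ht, rfl⟩ := hx
    rw [List.mem_iff_getElem] at ht
    obtain ⟨i, hi2, rfl⟩ := ht
    rw [List.getElem_drop]
    have hlen : hi + i < ps.length := by
      simp at hi2; omega
    have : ¬ P (ps[hi + i].1) := by
      rw [hiff _ hlen]; omega
    simp [hh, this]
  have htake0 : ((ps.take lo).map h).sum = 0 := by
    apply List.sum_eq_zero
    intro x hx
    rw [List.mem_map] at hx
    obtain ⟨t, ht, rfl⟩ := hx
    rw [List.mem_iff_getElem] at ht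
    obtain ⟨i, hi2, rfl⟩ := ht
    have hilo : i < lo := by simp at hi2; omega
    have hlen : i < ps.length := by simp at hi2; omega
    rw [List.getElem_take]
    have : ¬ P (ps[i].1) := by
      rw [hiff _ hlen]; omega
    simp [hh, this]
  have hmid : (((ps.drop lo).take (hi - lo)).map h) = ((ps.drop lo).take (hi - lo)).map (fun t => t.2) := by
    apply List.map_congr_left
    intro x hx
    rw [List.mem_iff_getElem] at hx
    obtain ⟨i, hi2, rfl⟩ := hx
    have hlb : i < hi - lo := by simp at hi2; omega
    have hlen : lo + i < ps.length := by omega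
    rw [List.getElem_take, List.getElem_drop]
    have : P (ps[lo + i].1) := by
      rw [hiff _ hlen]; omega
    simp [hh, this]
  conv_lhs => rw [hps, htakehi]
  rw [List.map_append, List.map_append, List.sum_append, List.sum_append, hdrop0, htake0, hmid]
  rw [← List.map_take, ← List.map_take, htakehi, List.map_append, List.sum_append]
  ring

-- per-layer agreement: A's linear scan = B's prefix-sum / binary-search query
theorem layer_eq (n : Int) (p pos : List Int) (ly lr : Int) :
    (PySem.List.pyRange 0 n 1).foldl (fun affected i =>
        if |ly - PySem.List.pyGetD pos i 0| ≤ lr then affected + PySem.List.pyGetD p i 0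
        else affected) 0
    = (let pts := PySem.List.sorted ((PySem.List.pyRange 0 n 1).map
          (fun i => (PySem.List.pyGetD pos i 0, PySem.List.pyGetD p i 0))) (fun t => t.1)
       let xs := pts.map (fun t => t.1)
       let pref := (pts.foldl (fun (a : List Int × Int) pw => (a.1 ++ [a.2 + pw.2], a.2 + pw.2)) ([0], 0)).1
       let lo := pvBisectLeft xs (ly - lr) 0 xs.length
       let hi := pvBisectRight xs (ly + lr) 0 xs.length
       if lo < hi then PySem.List.pyGetD pref (hi : Int) 0 - PySem.List.pyGetD pref (lo : Int) 0 else 0) := by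
  dsimp only
  set pts0 := (PySem.List.pyRange 0 n 1).map
      (fun i => (PySem.List.pyGetD pos i 0, PySem.List.pyGetD p i 0)) with hpts0
  set pts := PySem.List.sorted pts0 (fun t => t.1) with hpts
  set xs := pts.map (fun t => t.1) with hxs
  have hperm : pts.Perm pts0 := PySem.List.sorted_perm pts0 (fun t => t.1) false
  have hpair : pts.Pairwise (fun a b => a.1 ≤ b.1) := PySem.List.sorted_pairwise pts0 (fun t => t.1)
  have hxs_sorted : xs.Pairwise (· ≤ ·) := List.pairwise_map.mpr hpair
  have hxslen : xs.length = pts.length := by rw [hxs, List.length_map]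
  have hA : (PySem.List.pyRange 0 n 1).foldl (fun affected i =>
        if |ly - PySem.List.pyGetD pos i 0| ≤ lr then affected + PySem.List.pyGetD p i 0
        else affected) 0
      = (pts.map (fun t => if ly - lr ≤ t.1 ∧ t.1 ≤ ly + lr then t.2 else 0)).sum := by
    have hbody : (fun (affected : Int) (i : Int) =>
        if |ly - PySem.List.pyGetD pos i 0| ≤ lr then affected + PySem.List.pyGetD p i 0
        else affected)
        = (fun affected i => affected +
            (if ly - lr ≤ (PySem.List.pyGetD pos i 0) ∧ (PySem.List.pyGetD pos i 0) ≤ ly + lr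
             then PySem.List.pyGetD p i 0 else 0)) := by
      funext a i
      by_cases hc : |ly - PySem.List.pyGetD pos i 0| ≤ lr
      · have hc' : ly - lr ≤ PySem.List.pyGetD pos i 0 ∧ PySem.List.pyGetD pos i 0 ≤ ly + lr := by
          rw [abs_le] at hc; omega
        rw [if_pos hc, if_pos hc']
      · have hc' : ¬ (ly - lr ≤ PySem.List.pyGetD pos i 0 ∧ PySem.List.pyGetD pos i 0 ≤ ly + lr) := by
          rw [abs_le] at hc; omega
        rw [if_neg hc, if_neg hc', add_zero]
    rw [hbody, PySem.List.foldl_add, zero_add]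
    have : (PySem.List.pyRange 0 n 1).map (fun i =>
          if ly - lr ≤ (PySem.List.pyGetD pos i 0) ∧ (PySem.List.pyGetD pos i 0) ≤ ly + lr
          then PySem.List.pyGetD p i 0 else 0)
        = pts0.map (fun t => if ly - lr ≤ t.1 ∧ t.1 ≤ ly + lr then t.2 else 0) := by
      rw [hpts0, List.map_map]
      rfl
    rw [this]
    exact (List.Perm.sum_eq (hperm.map _)).symm
  rw [hA]
  obtain ⟨hLle, hLiff⟩ := pvBisectLeft_spec xs (ly - lr) hxs_sorted 0 xs.length
    (by omega) (le_refl _) (by intro j hj hlt; omega) (by intro j hj hge; omega)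
  obtain ⟨hRle, hRiff⟩ := pvBisectRight_spec xs (ly + lr) hxs_sorted 0 xs.length
    (by omega) (le_refl _) (by intro j hj hlt; omega) (by intro j hj hge; omega)
  set lo := pvBisectLeft xs (ly - lr) 0 xs.length with hlo
  set hi := pvBisectRight xs (ly + lr) 0 xs.length with hhi
  have hcontig : ∀ j (hj : j < pts.length),
      (ly - lr ≤ pts[j].1 ∧ pts[j].1 ≤ ly + lr) ↔ (lo ≤ j ∧ j < hi) := by
    intro j hj
    have hjx : j < xs.length := by omega
    have hx : xs[j] = pts[j].1 := by
      simp [hxs]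
    rw [← hx]
    have h1 := hLiff j hjx
    have h2 := hRiff j hjx
    constructor
    · rintro ⟨ha, hb⟩
      exact ⟨by by_contra hc; have := h1.mpr (by omega); omega, h2.mp hb⟩
    · rintro ⟨ha, hb⟩
      refine ⟨?_, h2.mpr hb⟩
      by_contra hc
      have := h1.mp (by omega)
      omega
  by_cases hcase : lo < hi
  · rw [if_pos hcase]
    rw [sum_if_contig pts (fun x => ly - lr ≤ x ∧ x ≤ ly + lr) lo hi (by omega) (by omega) hcontig]
    rw [pref_getD pts hi (by omega), pref_getD pts lo (by omega)]
  · rw [if_neg hcase]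
    apply List.sum_eq_zero
    intro x hx
    rw [List.mem_map] at hx
    obtain ⟨t, ht, rfl⟩ := hx
    rw [List.mem_iff_getElem] at ht
    obtain ⟨j, hj, rfl⟩ := ht
    rw [if_neg]
    intro hP
    have := (hcontig j hj).mp hP
    omega

-- ===== VERDICT (by name: the statement is the Claim_ definition above) =====
theorem max_healthy_cells_spec : Claim_equal_max_healthy_cells := by
  intro n p pos m y r _hd _hp
  unfold Spec_max_healthy_cells max_healthy_cells max_healthy_cells_alt
  dsimp only
  rw [PySem.List.foldl_append_singleton_eq_map]
  simp only [List.nil_append]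
  congr 2
  congr 1
  apply List.map_congr_left
  intro lyr _
  have h := layer_eq n p pos lyr.1 lyr.2
  dsimp only at h ⊢
  exact h
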